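-- pv_equiv track=rewrite | github.com/SmellyArmure/03-POOPythonOCR | World.py | trie_xy
-- ===== SOURCE A (Python) =====
-- def trie_xy(xy_tuple): # met les deux tableaux dans l'ordre des x croissants
-- 	x_val = xy_tuple[0]
-- 	y_val = xy_tuple[1]
-- 	assert len(x_val) == len(y_val) # s'assure que les deux tableaux sont de même longueur
-- 	coord = [(x_val[i],y_val[i]) for i in range(0,len(x_val))] # crée un tableau de tuples coordonnées
-- 	coord.sort() # trie (écrase) le tableau selon les valeurs de x
-- 	new_x = [c[0] for c in coord] # reconstitue une liste triée des x
-- 	assert all(new_x[i] <= new_x[i+1] for i in range(len(new_x)-1)) # vérifie que new_x est bien dans l'ordre croissant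
-- 	new_y = [c[1] for c in coord] # reconstitue une liste des y triée selon les x
-- 	return (new_x, new_y) # retourne un tuple qui contient les deux nouveaux tableaux
-- ===== SOURCE B (Python) =====
-- def _merge(a, b):  # iterative merge of two sorted runs of (x, y) pairs
--     out = []
--     i = 0
--     j = 0
--     while i < len(a) and j < len(b):
--         if a[i] <= b[j]:
--             out.append(a[i])
--             i += 1
--         else:
--             out.append(b[j])
--             j += 1
--     return out + a[i:] + b[j:]
--
-- def trie_xy(xy_tuple):  # bottom-up iterative merge sort of the paired points by (x, y), then unzip
--     x_val = xy_tuple[0]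
--     y_val = xy_tuple[1]
--     assert len(x_val) == len(y_val)
--     runs = [[p] for p in zip(x_val, y_val)]  # one singleton run per point
--     while len(runs) > 1:  # repeatedly merge adjacent runs, halving their number
--         merged = []
--         k = 0
--         while k + 1 < len(runs):
--             merged.append(_merge(runs[k], runs[k + 1]))
--             k += 2
--         if k < len(runs):
--             merged.append(runs[k])
--         runs = merged
--     pairs = runs[0] if runs else []
--     return ([p[0] for p in pairs], [p[1] for p in pairs])
-- ===== Notes on version B (the rewrite author's own statement) =====
-- stated objective: alternative
-- what changed: B replaces the built-in list.sort over the materialised pair list by a hand-written bottom-up iterative merge sort (singleton runs, repeated pairwise-merge passes) over zip(x,y), and drops A's redundant sortedness re-check; A delegates to Timsort, B is an explicit loop-based divide-and-conquer.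
import Mathlib
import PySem

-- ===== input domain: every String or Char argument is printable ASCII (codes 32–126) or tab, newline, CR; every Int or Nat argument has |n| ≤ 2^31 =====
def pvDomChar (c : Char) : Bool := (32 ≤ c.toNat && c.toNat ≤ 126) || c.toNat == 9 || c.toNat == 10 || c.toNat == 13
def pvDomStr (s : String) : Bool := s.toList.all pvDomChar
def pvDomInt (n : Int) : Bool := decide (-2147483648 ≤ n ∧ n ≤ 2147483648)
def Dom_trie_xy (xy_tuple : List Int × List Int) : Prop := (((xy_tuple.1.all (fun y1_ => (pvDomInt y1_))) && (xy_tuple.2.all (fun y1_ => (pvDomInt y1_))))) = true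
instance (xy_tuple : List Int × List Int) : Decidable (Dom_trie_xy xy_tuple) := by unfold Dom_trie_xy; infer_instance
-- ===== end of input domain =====

-- B replaces the built-in sort of the (x,y) pair list by a hand-written bottom-up
-- iterative merge sort over singleton runs, objective: alternative.

-- ===== PORT A =====
-- A: builds the list of (x,y) pairs, sorts the pairs lexicographically with list.sort, splits back.
def trie_xy (xy_tuple : List Int × List Int) : List Int × List Int :=
  let x_val := xy_tuple.1
  let y_val := xy_tuple.2
  let coord := (PySem.List.pyRange 0 x_val.length 1).map
    (fun i => (PySem.List.pyGetD x_val i 0, PySem.List.pyGetD y_val i 0))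
  let coordS := PySem.List.sorted2 coord Prod.fst Prod.snd
  let new_x := coordS.map Prod.fst
  let new_y := coordS.map Prod.snd
  (new_x, new_y)

-- ===== PORT B =====
-- Source B's _merge while loop: the two cursors i, j are represented by the
-- not-yet-consumed suffixes of a and b; out is the accumulator; the fuel
-- argument (total remaining length, always sufficient) only makes the
-- recursion structural, it never changes the computation. The final
-- 'out + a[i:] + b[j:]' is 'out ++ a ++ b' on the remaining suffixes.
def pvMergeGo : Nat → List (Int × Int) → List (Int × Int) → List (Int × Int) → List (Int × Int)
  | 0, a, b, out => out ++ a ++ b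
  | fuel + 1, a, b, out =>
    match a, b with
    | p :: a', q :: b' =>
        if p.1 < q.1 ∨ (p.1 = q.1 ∧ p.2 ≤ q.2) then pvMergeGo fuel a' (q :: b') (out ++ [p])
        else pvMergeGo fuel (p :: a') b' (out ++ [q])
    | a, b => out ++ a ++ b

def pvMergeRuns (a b : List (Int × Int)) : List (Int × Int) :=
  pvMergeGo (a.length + b.length) a b []

-- Source B's inner while over k: consume the run list two adjacent runs at a time
-- (k, k+1), keeping a trailing odd run.
def pvPass : List (List (Int × Int)) → List (List (Int × Int))
  | [] => []
  | [r] => [r]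
  | r1 :: r2 :: t => pvMergeRuns r1 r2 :: pvPass t

-- Source B's outer 'while len(runs) > 1' loop, then 'runs[0] if runs else []';
-- fuel = number of runs, enough since every pass strictly shrinks the list.
def pvMergeAllGo : Nat → List (List (Int × Int)) → List (Int × Int)
  | 0, runs => match runs with
    | [] => []
    | r :: _ => r
  | fuel + 1, runs =>
    if runs.length > 1 then pvMergeAllGo fuel (pvPass runs)
    else match runs with
      | [] => []
      | r :: _ => r

def pvMergeAll (runs : List (List (Int × Int))) : List (Int × Int) :=
  pvMergeAllGo runs.length runs

-- B: zip the two arrays into singleton runs, bottom-up merge them, unzip.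
def trie_xy_alt (xy_tuple : List Int × List Int) : List Int × List Int :=
  let x_val := xy_tuple.1
  let y_val := xy_tuple.2
  let runs := (x_val.zip y_val).map (fun p => [p])
  let pairs := pvMergeAll runs
  (pairs.map (fun p => p.1), pairs.map (fun p => p.2))

-- ===== PRECONDITION & SPEC =====
-- A asserts len(x) == len(y); on unequal lengths Python A raises AssertionError.
def Pre_trie_xy (xy_tuple : List Int × List Int) : Prop :=
  xy_tuple.1.length = xy_tuple.2.length
instance (xy_tuple : List Int × List Int) : Decidable (Pre_trie_xy xy_tuple) := by
  unfold Pre_trie_xy; infer_instance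
def pvWitness_trie_xy : (List Int × List Int) := ([3, 1, 2], [10, 20, 30])
def Spec_trie_xy (xy_tuple : List Int × List Int) (out : List Int × List Int) : Prop := out = trie_xy_alt xy_tuple
instance (xy_tuple : List Int × List Int) (out : List Int × List Int) : Decidable (Spec_trie_xy xy_tuple out) := by unfold Spec_trie_xy; infer_instance

-- ===== CLAIM (what is proved, stated in full; the proofs are below) =====
def Claim_equal_trie_xy : Prop := ∀ (xy_tuple : List Int × List Int), Dom_trie_xy xy_tuple → Pre_trie_xy xy_tuple → Spec_trie_xy xy_tuple (trie_xy xy_tuple)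

-- ===== LEMMAS AND PROOFS =====

-- The comprehension A builds is exactly the zip of the two equal-length lists.
theorem coord_eq_zip (x y : List Int) (h : x.length = y.length) :
    (PySem.List.pyRange 0 x.length 1).map
      (fun i => (PySem.List.pyGetD x i 0, PySem.List.pyGetD y i 0)) = x.zip y := by
  apply List.ext_getElem
  · simp [PySem.List.length_pyRange_one, h]
  · intro n h1 h2
    have hl : n < x.length := by
      simpa [PySem.List.length_pyRange_one] using h1
    simp only [List.getElem_map, PySem.List.getElem_pyRange_one, List.getElem_zip, zero_add]
    rw [PySem.List.pyGetD_eq_getElem x 0 (by omega) (by exact_mod_cast hl),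
        PySem.List.pyGetD_eq_getElem y 0 (by omega) (by exact_mod_cast (h ▸ hl))]
    simp

theorem cmp_eq_lexLt :
    (fun a b : Int × Int => decide (a.1 < b.1) || (!decide (b.1 < a.1) && decide (a.2 < b.2)))
      = (fun a b : Int × Int => decide (toLex a < toLex b)) := by
  funext a b
  rcases a with ⟨a1, a2⟩; rcases b with ⟨b1, b2⟩
  have hlt : (toLex ((a1, a2) : Int × Int) < toLex (b1, b2)) ↔ (a1 < b1 ∨ a1 = b1 ∧ a2 < b2) :=
    Prod.Lex.toLex_lt_toLex
  apply Bool.eq_iff_iff.mpr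
  simp only [Bool.or_eq_true, Bool.and_eq_true, Bool.not_eq_true',
    decide_eq_true_iff, decide_eq_false_iff_not, hlt]
  omega

theorem sorted2_eq_sorted_toLex (xs : List (Int × Int)) :
    PySem.List.sorted2 xs Prod.fst Prod.snd
      = PySem.List.sorted xs (fun p => toLex p) false := by
  rw [PySem.List.sorted_eq_foldl_insertBy]
  show xs.foldl (fun acc x => PySem.List.insertBy
      (fun a b => decide (a.1 < b.1) || (!decide (b.1 < a.1) && decide (a.2 < b.2))) x acc) [] = _
  rw [cmp_eq_lexLt]

-- structural specification of the merge loop (proof-side only)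
def pvMerge : List (Int × Int) → List (Int × Int) → List (Int × Int)
  | [], b => b
  | a, [] => a
  | p :: a, q :: b =>
      if p.1 < q.1 ∨ (p.1 = q.1 ∧ p.2 ≤ q.2) then p :: pvMerge a (q :: b)
      else q :: pvMerge (p :: a) b

theorem pvMergeGo_eq (fuel : Nat) : ∀ (a b out : List (Int × Int)),
    a.length + b.length ≤ fuel → pvMergeGo fuel a b out = out ++ pvMerge a b := by
  induction fuel with
  | zero =>
      intro a b out h
      have ha : a = [] := by
        rcases a with _ | _
        · rfl
        · simp at h
      subst ha
      simp [pvMergeGo, pvMerge]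
  | succ fuel ih =>
      intro a b out h
      rcases a with _ | ⟨p, a'⟩
      · simp [pvMergeGo, pvMerge]
      · rcases b with _ | ⟨q, b'⟩
        · simp [pvMergeGo, pvMerge]
        · simp only [pvMergeGo]
          by_cases hc : p.1 < q.1 ∨ (p.1 = q.1 ∧ p.2 ≤ q.2)
          · rw [if_pos hc, ih _ _ _ (by simp at h ⊢; omega), pvMerge, if_pos hc]
            simp
          · rw [if_neg hc, ih _ _ _ (by simp at h ⊢; omega), pvMerge, if_neg hc]
            simp

theorem pvMergeRuns_eq (a b : List (Int × Int)) : pvMergeRuns a b = pvMerge a b := by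
  simpa using pvMergeGo_eq (a.length + b.length) a b [] (le_refl _)

theorem pvMerge_perm (a b : List (Int × Int)) :
    (pvMerge a b).Perm (a ++ b) := by
  induction a, b using pvMerge.induct with
  | case1 b => simp [pvMerge]
  | case2 a h => simp [pvMerge]
  | case3 p a q b hc ih =>
      simp only [pvMerge, if_pos hc]
      exact List.Perm.cons p ih
  | case4 p a q b hc ih =>
      simp only [pvMerge, if_neg hc]
      exact (List.Perm.cons q ih).trans List.perm_middle.symm

-- the merge condition is exactly toLex ≤ toLex
theorem cond_iff_lexLe (p q : Int × Int) :
    (p.1 < q.1 ∨ (p.1 = q.1 ∧ p.2 ≤ q.2)) ↔ toLex p ≤ toLex q := by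
  rcases p with ⟨a1, a2⟩; rcases q with ⟨b1, b2⟩
  rw [Prod.Lex.toLex_le_toLex]

theorem lex_total (p q : Int × Int) :
    ¬ (p.1 < q.1 ∨ (p.1 = q.1 ∧ p.2 ≤ q.2)) → toLex q ≤ toLex p := by
  intro h
  rw [← cond_iff_lexLe]
  rcases p with ⟨a1, a2⟩; rcases q with ⟨b1, b2⟩
  simp at h ⊢; omega

theorem pvMerge_pairwise (a b : List (Int × Int))
    (ha : a.Pairwise (fun p q => toLex p ≤ toLex q))
    (hb : b.Pairwise (fun p q => toLex p ≤ toLex q)) :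
    (pvMerge a b).Pairwise (fun p q => toLex p ≤ toLex q) := by
  induction a, b using pvMerge.induct with
  | case1 b => simpa [pvMerge] using hb
  | case2 a h => simpa [pvMerge] using ha
  | case3 p a q b hc ih =>
      simp only [pvMerge, if_pos hc]
      rw [List.pairwise_cons]
      refine ⟨?_, ih (List.Pairwise.of_cons ha) hb⟩
      intro r hr
      have hr' := (pvMerge_perm a (q :: b)).mem_iff.mp hr
      rcases List.mem_append.mp hr' with h1 | h1
      · exact (List.pairwise_cons.mp ha).1 r h1
      · rcases List.mem_cons.mp h1 with rfl | h2
        · exact (cond_iff_lexLe p r).mp hc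
        · exact le_trans ((cond_iff_lexLe p q).mp hc) ((List.pairwise_cons.mp hb).1 r h2)
  | case4 p a q b hc ih =>
      simp only [pvMerge, if_neg hc]
      rw [List.pairwise_cons]
      refine ⟨?_, ih ha (List.Pairwise.of_cons hb)⟩
      intro r hr
      have hr' := (pvMerge_perm (p :: a) b).mem_iff.mp hr
      have hqp : toLex q ≤ toLex p := lex_total p q hc
      rcases List.mem_append.mp hr' with h1 | h1
      · rcases List.mem_cons.mp h1 with rfl | h2
        · exact hqp
        · exact le_trans hqp ((List.pairwise_cons.mp ha).1 r h2)
      · exact (List.pairwise_cons.mp hb).1 r h1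

theorem pvPass_length (l : List (List (Int × Int))) :
    (pvPass l).length ≤ l.length ∧ (2 ≤ l.length → (pvPass l).length < l.length) := by
  induction l using pvPass.induct with
  | case1 => simp [pvPass]
  | case2 r => simp [pvPass]
  | case3 r1 r2 t ih => simp only [pvPass, List.length_cons]; omega

theorem pvPass_flatten_perm (l : List (List (Int × Int))) :
    (pvPass l).flatten.Perm l.flatten := by
  induction l using pvPass.induct with
  | case1 => simp [pvPass]
  | case2 r => simp [pvPass]
  | case3 r1 r2 t ih =>
      simp only [pvPass, List.flatten_cons, pvMergeRuns_eq]
      simpa [List.append_assoc] using (pvMerge_perm r1 r2).append ih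

theorem pvPass_sorted (l : List (List (Int × Int)))
    (h : ∀ r ∈ l, r.Pairwise (fun p q => toLex p ≤ toLex q)) :
    ∀ r ∈ pvPass l, r.Pairwise (fun p q => toLex p ≤ toLex q) := by
  induction l using pvPass.induct with
  | case1 => simp [pvPass]
  | case2 r => simpa [pvPass] using h
  | case3 r1 r2 t ih =>
      intro r hr
      rcases List.mem_cons.mp hr with rfl | hr2
      · rw [pvMergeRuns_eq]
        exact pvMerge_pairwise _ _ (h r1 (by simp)) (h r2 (by simp))
      · exact ih (fun s hs => h s (by simp [hs])) r hr2

theorem pvMergeAllGo_spec (fuel : Nat) : ∀ (runs : List (List (Int × Int))),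
    runs.length ≤ fuel →
    (∀ r ∈ runs, r.Pairwise (fun p q => toLex p ≤ toLex q)) →
    (pvMergeAllGo fuel runs).Perm runs.flatten ∧
      (pvMergeAllGo fuel runs).Pairwise (fun p q => toLex p ≤ toLex q) := by
  induction fuel with
  | zero =>
      intro runs hlen h
      have : runs = [] := List.length_eq_zero_iff.mp (by omega)
      subst this
      simp [pvMergeAllGo]
  | succ fuel ih =>
      intro runs hlen h
      by_cases hgt : runs.length > 1
      · rw [pvMergeAllGo.eq_def]; simp only []; rw [if_pos hgt]
        have hfit : (pvPass runs).length ≤ fuel := by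
          have := (pvPass_length runs).2 (by omega)
          omega
        obtain ⟨hp, hs⟩ := ih (pvPass runs) hfit (pvPass_sorted runs h)
        exact ⟨hp.trans (pvPass_flatten_perm runs), hs⟩
      · rw [pvMergeAllGo.eq_def]; simp only []; rw [if_neg hgt]
        rcases runs with _ | ⟨r, t⟩
        · simp
        · have ht : t = [] := by
            rcases t with _ | _
            · rfl
            · simp at hgt
          subst ht
          exact ⟨by simp, h r (by simp)⟩

theorem pvMergeAll_spec (runs : List (List (Int × Int)))
    (h : ∀ r ∈ runs, r.Pairwise (fun p q => toLex p ≤ toLex q)) :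
    (pvMergeAll runs).Perm runs.flatten ∧
      (pvMergeAll runs).Pairwise (fun p q => toLex p ≤ toLex q) :=
  pvMergeAllGo_spec runs.length runs (le_refl _) h

-- A's sorted2 result equals B's bottom-up merge-sort result: both are permutations
-- of the pair list that are pairwise ≤ under the injective key toLex.
theorem msort_eq_sorted2 (xs : List (Int × Int)) :
    PySem.List.sorted2 xs Prod.fst Prod.snd = pvMergeAll (xs.map (fun p => [p])) := by
  rw [sorted2_eq_sorted_toLex]
  have hflat : (xs.map (fun p => [p])).flatten = xs := by
    induction xs with
    | nil => rfl
    | cons p t ih => simp [ih]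
  obtain ⟨hp, hs⟩ := pvMergeAll_spec (xs.map (fun p => [p])) (by
    intro r hr
    rcases List.mem_map.mp hr with ⟨p, _, rfl⟩
    simp)
  rw [hflat] at hp
  exact PySem.List.eq_of_perm_of_pairwise_le_of_injective (fun p => toLex p)
    (fun a b hab => hab)
    ((PySem.List.sorted_perm xs _ false).trans hp.symm)
    (PySem.List.sorted_pairwise xs _) hs

-- ===== VERDICT (by name: the statement is the Claim_ definition above) =====
theorem trie_xy_spec : Claim_equal_trie_xy := by
  intro t _ hpre
  show trie_xy t = trie_xy_alt t
  unfold trie_xy trie_xy_alt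
  dsimp only
  rw [coord_eq_zip t.1 t.2 hpre, msort_eq_sorted2]
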